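-- pv_equiv track=rewrite | github.com/irahorecka/Golden-Gate-cloning-junction-sequence-checker-and-generator | AA_to_NT_generator.py | sort_grouped
-- ===== SOURCE A (Python) =====
-- def sort_grouped(sort_list):
--     sort_set = sorted(set(sort_list))
--     count_list = list()
--     grouped_list = list()
--     for i in sort_set:
--         count_list.append(sort_list.count(i))
--     index = 0
--     for j in count_list:
--         grouped_list.append([sort_set[index]] * j)
--         index += 1
--     return grouped_list
-- ===== SOURCE B (Python) =====
-- def sort_grouped(sort_list):
--     # Sort once, then grow runs in a single pass: each element either extends
--     # the last group (same value) or starts a new group.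
--     grouped = []
--     for x in sorted(sort_list):
--         if grouped and grouped[-1][0] == x:
--             grouped[-1].append(x)
--         else:
--             grouped.append([x])
--     return grouped
-- ===== Notes on version B (the rewrite author's own statement) =====
-- stated objective: faster
-- what changed: Replaces set-dedup plus a per-distinct-value rescan of the whole list (list.count) and an index-driven replication loop by one sort of the input followed by a single run-building pass that appends each element to the last group or opens a new one.
import Mathlib
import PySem

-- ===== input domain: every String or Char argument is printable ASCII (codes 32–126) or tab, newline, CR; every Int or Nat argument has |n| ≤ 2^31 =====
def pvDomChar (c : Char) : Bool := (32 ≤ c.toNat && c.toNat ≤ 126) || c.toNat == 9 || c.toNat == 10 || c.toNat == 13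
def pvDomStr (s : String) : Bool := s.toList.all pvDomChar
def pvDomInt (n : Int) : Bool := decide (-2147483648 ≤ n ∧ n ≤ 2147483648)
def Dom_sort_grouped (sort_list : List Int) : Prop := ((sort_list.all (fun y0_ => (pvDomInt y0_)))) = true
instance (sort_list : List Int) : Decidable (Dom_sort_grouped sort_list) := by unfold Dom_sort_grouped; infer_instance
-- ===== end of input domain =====

-- B replaces A's set-dedup + per-distinct-value rescan (list.count) + index loop by one sort
-- and a single run-building pass (objective: faster).

-- ===== PORT A =====
-- sort_set = sorted(set(sort_list))
def pvSortSet (sort_list : List Int) : List Int :=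
  PySem.List.sorted (PySem.Set.ofList sort_list) (fun x => x)

def sort_grouped (sort_list : List Int) : List (List Int) :=
  -- for i in sort_set: count_list.append(sort_list.count(i))
  let count_list : List Int :=
    (pvSortSet sort_list).foldl (fun acc i => acc ++ [(PySem.List.count sort_list i : Int)]) []
  -- for j in count_list: grouped_list.append([sort_set[index]] * j); index += 1
  -- (index is always in range here, so sort_set[index] is pyGetD with an unread default)
  (count_list.foldl
    (fun (st : List (List Int) × Int) j =>
      (st.1 ++ [List.replicate j.toNat (PySem.List.pyGetD (pvSortSet sort_list) st.2 0)], st.2 + 1))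
    ([], 0)).1

-- ===== PORT B =====
-- one step of B's loop body: extend the last group or open a new one
-- (grouped[-1][0] is g.headD 0: every group is built nonempty, so the default is never read)
def pvStep (grouped : List (List Int)) (x : Int) : List (List Int) :=
  match grouped.getLast? with
  | some g => if g.headD 0 == x then grouped.dropLast ++ [g ++ [x]] else grouped ++ [[x]]
  | none => grouped ++ [[x]]

def sort_grouped_alt (sort_list : List Int) : List (List Int) :=
  (PySem.List.sorted sort_list (fun x => x)).foldl pvStep []

-- ===== PRECONDITION & SPEC =====
def Spec_sort_grouped (sort_list : List Int) (out : List (List Int)) : Prop := out = sort_grouped_alt sort_list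
instance (sort_list : List Int) (out : List (List Int)) : Decidable (Spec_sort_grouped sort_list out) := by unfold Spec_sort_grouped; infer_instance

-- ===== CLAIM (what is proved, stated in full; the proofs are below) =====
def Claim_equal_sort_grouped : Prop := ∀ (sort_list : List Int), Dom_sort_grouped sort_list → Spec_sort_grouped sort_list (sort_grouped sort_list)

-- ===== LEMMAS AND PROOFS =====

-- proof-side helper: the maximal runs of equal elements of a list
def pvRuns : List Int → List (List Int)
  | [] => []
  | x :: xs => (x :: xs.takeWhile (fun y => y == x)) :: pvRuns (xs.dropWhile (fun y => y == x))
termination_by s => s.length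
decreasing_by
  simpa using Nat.lt_succ_of_le (List.length_dropWhile_le _ _)

-- ----- A-side characterisation -----

theorem pv_foldA (full : List Int) (c : Int → Int) :
    ∀ (m k : Nat) (acc : List (List Int)), k + m = full.length →
    (((full.drop k).map c).foldl
      (fun (st : List (List Int) × Int) j =>
        (st.1 ++ [List.replicate j.toNat (PySem.List.pyGetD full st.2 0)], st.2 + 1))
      (acc, (k : Int))).1
    = acc ++ (full.drop k).map (fun x => List.replicate (c x).toNat x) := by
  intro m
  induction m with
  | zero =>
    intro k acc hk
    have : full.drop k = [] := List.drop_eq_nil_of_le (by omega)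
    simp [this]
  | succ m ih =>
    intro k acc hk
    have hklt : k < full.length := by omega
    have hdrop : full.drop k = full[k] :: full.drop (k + 1) :=
      List.drop_eq_getElem_cons hklt
    have hget : PySem.List.pyGetD full (k : Int) 0 = full[k] := by
      rw [PySem.List.pyGetD_natCast]
      exact List.getD_eq_getElem _ _ hklt
    have hih := ih (k + 1) (acc ++ [List.replicate (c full[k]).toNat full[k]]) (by omega)
    rw [hdrop]
    simp only [List.map_cons, List.foldl_cons, hget]
    have hcast : (k : Int) + 1 = ((k + 1 : Nat) : Int) := by push_cast; ring
    rw [hcast, hih, List.append_assoc]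
    rfl

theorem pv_A_eq_map (sort_list : List Int) :
    sort_grouped sort_list
    = (pvSortSet sort_list).map (fun v => List.replicate (sort_list.count v) v) := by
  unfold sort_grouped
  rw [PySem.List.foldl_append_singleton_eq_map]
  simp only [List.nil_append]
  have := pv_foldA (pvSortSet sort_list)
      (fun i => (PySem.List.count sort_list i : Int)) (pvSortSet sort_list).length 0 [] (by omega)
  simp only [List.drop_zero, List.nil_append, Nat.cast_zero] at this
  rw [this]
  simp [PySem.List.count]

-- ----- B-side characterisation -----

theorem pv_run_sorted (x : Int) (s : List Int) (h : (x :: s).Pairwise (· ≤ ·)) :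
    s.takeWhile (fun y => y == x) = List.replicate (s.count x) x := by
  induction s with
  | nil => simp
  | cons y s' ih =>
    have hxy : x ≤ y := (List.pairwise_cons.mp h).1 y (by simp)
    by_cases hyx : y = x
    · have ht : (y == x) = true := by simp [hyx]
      rw [List.takeWhile_cons, ht]
      simp only [if_true]
      have h' : (x :: s').Pairwise (· ≤ ·) :=
        h.sublist ((List.sublist_cons_self y s').cons_cons x)
      rw [ih h', hyx, List.count_cons_self, List.replicate_succ]
    · have hne : (y == x) = false := by simp [hyx]
      rw [List.takeWhile_cons, hne]
      have hmem : x ∉ y :: s' := by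
        intro hm
        rcases List.mem_cons.mp hm with h1 | h2
        · exact hyx h1.symm
        · have := (List.pairwise_cons.mp (List.pairwise_cons.mp h).2).1 x h2
          have : y = x := le_antisymm this (by omega)
          exact hyx this
      rw [List.count_eq_zero.mpr hmem]
      simp

theorem pv_lt_of_mem_dropWhile (x : Int) (s : List Int) (h : (x :: s).Pairwise (· ≤ ·)) :
    ∀ y ∈ s.dropWhile (fun y => y == x), x < y := by
  induction s with
  | nil => simp
  | cons z s' ih =>
    have hxz : x ≤ z := (List.pairwise_cons.mp h).1 z (by simp)
    by_cases hzx : z = x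
    · have ht : (z == x) = true := by simp [hzx]
      rw [List.dropWhile_cons, ht]
      simp only [if_true]
      exact ih (h.sublist ((List.sublist_cons_self z s').cons_cons x))
    · have hne : (z == x) = false := by simp [hzx]
      rw [List.dropWhile_cons, hne]
      intro y hy
      have hxltz : x < z := lt_of_le_of_ne hxz (fun hh => hzx hh.symm)
      rcases List.mem_cons.mp hy with h1 | h2
      · omega
      · have := (List.pairwise_cons.mp (List.pairwise_cons.mp h).2).1 y h2
        omega

theorem pv_foldB : ∀ (n : Nat) (s : List Int), s.length ≤ n → s.Pairwise (· ≤ ·) →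
    ∀ (v : Int), (∀ y ∈ s, v ≤ y) → ∀ (pre : List (List Int)) (m : Nat), 0 < m →
    s.foldl pvStep (pre ++ [List.replicate m v])
    = pre ++ (List.replicate (m + s.count v) v) :: pvRuns (s.dropWhile (fun y => y == v)) := by
  intro n
  induction n with
  | zero =>
    intro s hs _ v _ pre m _
    have : s = [] := List.length_eq_zero_iff.mp (by omega)
    subst this; simp [pvRuns]
  | succ n ih =>
    intro s hs hp v hv pre m hm
    match s with
    | [] => simp [pvRuns]
    | y :: s' =>
      have hlen : s'.length ≤ n := by simp at hs; omega
      have htail : s'.Pairwise (· ≤ ·) := (List.pairwise_cons.mp hp).2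
      have hhead : (List.replicate m v).head?.getD 0 = v := by
        match m, hm with
        | Nat.succ m', _ => simp [List.replicate_succ]
      by_cases hyv : y = v
      · subst hyv
        have hstep : pvStep (pre ++ [List.replicate m y]) y = pre ++ [List.replicate m y ++ [y]] := by
          unfold pvStep
          rw [List.getLast?_concat]
          simp [hhead]
        rw [List.foldl_cons, hstep]
        have hrep : List.replicate m y ++ [y] = List.replicate (m + 1) y := by
          simp [List.replicate_succ']
        rw [hrep]
        have hv' : ∀ z ∈ s', y ≤ z := fun z hz => hv z (by simp [hz])
        rw [ih s' hlen htail y hv' pre (m + 1) (by omega)]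
        have hdw : List.dropWhile (fun z => z == y) (y :: s') = List.dropWhile (fun z => z == y) s' := by
          simp
        rw [hdw, List.count_cons_self]
        congr 3
        omega
      · have hvy : v < y := lt_of_le_of_ne (hv y (by simp)) (fun hh => hyv hh.symm)
        have hne : (v == y) = false := by simp; omega
        have hstep : pvStep (pre ++ [List.replicate m v]) y
            = (pre ++ [List.replicate m v]) ++ [[y]] := by
          unfold pvStep
          rw [List.getLast?_concat]
          simp [hhead, hne]
        rw [List.foldl_cons, hstep]
        have hone : ([y] : List Int) = List.replicate 1 y := by simp
        have hv' : ∀ z ∈ s', y ≤ z := (List.pairwise_cons.mp hp).1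
        have := ih s' hlen htail y hv' (pre ++ [List.replicate m v]) 1 (by omega)
        rw [show ((pre ++ [List.replicate m v]) ++ [[y]] : List (List Int))
              = (pre ++ [List.replicate m v]) ++ [List.replicate 1 y] from by simp,
            this]
        -- right-hand side: v does not occur in y :: s'
        have hvnot : v ∉ y :: s' := by
          intro hm'
          rcases List.mem_cons.mp hm' with h1 | h2
          · exact hyv h1.symm
          · have := hv' v h2; omega
        have hc0 : (y :: s').count v = 0 := List.count_eq_zero.mpr hvnot
        have hdw : List.dropWhile (fun z => z == v) (y :: s') = y :: s' := by
          simp [hyv]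
        rw [hc0, hdw]
        have hruns : pvRuns (y :: s')
            = (y :: s'.takeWhile (fun z => z == y)) :: pvRuns (s'.dropWhile (fun z => z == y)) := by
          rw [pvRuns]
        rw [hruns, pv_run_sorted y s' hp]
        simp only [Nat.add_zero]
        rw [Nat.add_comm, List.replicate_succ]
        simp

-- B's fold equals run-grouping of the sorted list
theorem pv_B_eq_runs (sort_list : List Int) :
    sort_grouped_alt sort_list = pvRuns (PySem.List.sorted sort_list (fun x => x)) := by
  unfold sort_grouped_alt
  have hp : (PySem.List.sorted sort_list (fun x => x)).Pairwise (· ≤ ·) := by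
    simpa using PySem.List.sorted_pairwise sort_list (fun x => x)
  generalize hgen : PySem.List.sorted sort_list (fun x => x) = s at hp ⊢
  match s with
  | [] => simp [pvRuns]
  | x :: s' =>
    have hstep0 : pvStep [] x = [] ++ [List.replicate 1 x] := by
      unfold pvStep; simp
    rw [List.foldl_cons, hstep0,
      pv_foldB s'.length s' le_rfl (List.pairwise_cons.mp hp).2 x (List.pairwise_cons.mp hp).1 [] 1 (by omega)]
    rw [pvRuns, pv_run_sorted x s' hp, Nat.add_comm, List.replicate_succ]
    rfl

-- run-grouping of a sorted list is the grouped form A computes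
theorem pv_runs_eq : ∀ (n : Nat) (s : List Int), s.length ≤ n → s.Pairwise (· ≤ ·) →
    pvRuns s
    = (PySem.List.sorted (PySem.Set.ofList s) (fun a => a)).map
        (fun v => List.replicate (s.count v) v) := by
  intro n
  induction n with
  | zero =>
    intro s hs _
    have : s = [] := List.length_eq_zero_iff.mp (by omega)
    subst this
    simp [pvRuns, PySem.Set.ofList, PySem.List.sorted]
  | succ n ih =>
    intro s hs hp
    match s with
    | [] => simp [pvRuns, PySem.Set.ofList, PySem.List.sorted]
    | x :: xs =>
      have htail : xs.Pairwise (· ≤ ·) := (List.pairwise_cons.mp hp).2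
      have hlt := pv_lt_of_mem_dropWhile x xs hp
      have hd : (xs.dropWhile (fun y => y == x)).Pairwise (· ≤ ·) :=
        htail.sublist (List.dropWhile_sublist _)
      have hdlen : (xs.dropWhile (fun y => y == x)).length ≤ n := by
        have := List.length_dropWhile_le (fun y => y == x) xs
        simp at hs; omega
      have hih := ih _ hdlen hd
      -- the sorted distinct values of s are x followed by those of the dropped suffix
      have hsorted : PySem.List.sorted (PySem.Set.ofList (x :: xs)) (fun a => a)
          = x :: PySem.List.sorted (PySem.Set.ofList (xs.dropWhile (fun y => y == x))) (fun a => a) := by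
        apply PySem.List.sorted_eq_of_perm_of_pairwise_lt
        · rw [List.perm_ext_iff_of_nodup]
          · intro a
            rw [PySem.Set.mem_ofList]
            constructor
            · intro ha
              rcases List.mem_cons.mp ha with h1 | h2
              · simp [h1]
              · rw [PySem.List.mem_sorted, PySem.Set.mem_ofList] at h2
                exact List.mem_cons_of_mem x ((List.dropWhile_sublist _).mem h2)
            · intro ha
              rcases List.mem_cons.mp ha with h1 | h2
              · simp [h1]
              · have hsplit : a ∈ xs.takeWhile (fun y => y == x) ++ xs.dropWhile (fun y => y == x) := by
                  rw [List.takeWhile_append_dropWhile]; exact h2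
                rcases List.mem_append.mp hsplit with h3 | h4
                · have hax : a = x := by simpa using List.mem_takeWhile_imp h3
                  simp [hax]
                · exact List.mem_cons_of_mem x
                    (by rw [PySem.List.mem_sorted, PySem.Set.mem_ofList]; exact h4)
          · rw [List.nodup_cons]
            refine ⟨?_, ((PySem.List.sorted_perm _ _ _).nodup_iff).mpr (PySem.Set.nodup_ofList _)⟩
            intro hx
            rw [PySem.List.mem_sorted, PySem.Set.mem_ofList] at hx
            exact absurd rfl (ne_of_gt (hlt x hx))
          · exact PySem.Set.nodup_ofList _
        · rw [List.pairwise_cons]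
          refine ⟨?_, PySem.List.sorted_ofList_pairwise_lt _⟩
          intro a ha
          rw [PySem.List.mem_sorted, PySem.Set.mem_ofList] at ha
          exact hlt a ha
      rw [pvRuns, hsorted, List.map_cons, hih]
      congr 1
      · rw [pv_run_sorted x xs hp, List.count_cons_self]
        simp [List.replicate_succ]
      · apply List.map_congr_left
        intro a ha
        rw [PySem.List.mem_sorted, PySem.Set.mem_ofList] at ha
        have hax : x < a := hlt a ha
        congr 1
        -- count a (x :: xs) = count a (dropWhile)
        have h1 : (x :: xs).count a = xs.count a := by
          rw [List.count_cons]
          simp [show ¬ (x = a) from by omega]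
        have h2 : xs.count a
            = (xs.takeWhile (fun y => y == x)).count a + (xs.dropWhile (fun y => y == x)).count a := by
          conv_lhs => rw [← List.takeWhile_append_dropWhile (p := fun y => y == x) (l := xs)]
          rw [List.count_append]
        have h3 : (xs.takeWhile (fun y => y == x)).count a = 0 := by
          have hne : (x == a) = false := by simp; omega
          rw [pv_run_sorted x xs hp, List.count_replicate, hne]
          simp
        rw [h1, h2, h3]
        omega

-- ===== VERDICT (by name: the statement is the Claim_ definition above) =====
theorem sort_grouped_spec : Claim_equal_sort_grouped := by
  intro sort_list _
  unfold Spec_sort_grouped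
  rw [pv_A_eq_map, pv_B_eq_runs,
    pv_runs_eq (PySem.List.sorted sort_list (fun x => x)).length _ le_rfl
      (by simpa using PySem.List.sorted_pairwise sort_list (fun x => x))]
  unfold pvSortSet
  have hperm : (PySem.Set.ofList sort_list).Perm
      (PySem.Set.ofList (PySem.List.sorted sort_list (fun x => x))) := by
    rw [List.perm_ext_iff_of_nodup (PySem.Set.nodup_ofList _) (PySem.Set.nodup_ofList _)]
    intro a
    rw [PySem.Set.mem_ofList, PySem.Set.mem_ofList, PySem.List.mem_sorted]
  rw [PySem.List.sorted_eq_sorted_of_perm _ _ _ (fun a b h => h) hperm]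
  apply List.map_congr_left
  intro a _
  congr 1
  exact ((PySem.List.sorted_perm sort_list (fun x => x) false).count_eq a).symm
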